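-- pv_equiv track=rewrite | github.com/ranfort77/games | Borderlands 2/classify_continuous_equal_values.py | grouping_conteq_vals
-- ===== SOURCE A (Python) =====
-- def grouping_conteq_vals(vals):
--     """
--     주의: vals는 sequence인데, 원소의 값으로 None은 허용되지 않는다.
--     """
--     group = []
--     prev = None
--     igrp = 1
--     for curr in vals:
--         if curr is None:
--             raise ValueError('input sequence 원소값으로 None은 허용되지 않음')
--         if (prev is not None) and (prev != curr):
--             igrp += 1
--         group.append(igrp)
--         prev = curr
--     return group
-- ===== SOURCE B (Python) =====
-- def grouping_conteq_vals(vals):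
--     # Run-based re-implementation: scan maximal runs of equal values with two
--     # indices and emit the run's label in one block, instead of comparing each
--     # element to a running prev.
--     if any(v is None for v in vals):
--         raise ValueError('input sequence 원소값으로 None은 허용되지 않음')
--     group = []
--     i, g, n = 0, 1, len(vals)
--     while i < n:
--         j = i
--         while j < n and vals[j] == vals[i]:
--             j += 1
--         group.extend([g] * (j - i))
--         g += 1
--         i = j
--     return group
-- ===== Notes on version B (the rewrite author's own statement) =====
-- stated objective: alternative
-- what changed: B detects maximal runs of equal values with a two-pointer scan and emits each run's label as a block, instead of A's element-by-element comparison with a running prev and per-element append.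
import Mathlib
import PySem

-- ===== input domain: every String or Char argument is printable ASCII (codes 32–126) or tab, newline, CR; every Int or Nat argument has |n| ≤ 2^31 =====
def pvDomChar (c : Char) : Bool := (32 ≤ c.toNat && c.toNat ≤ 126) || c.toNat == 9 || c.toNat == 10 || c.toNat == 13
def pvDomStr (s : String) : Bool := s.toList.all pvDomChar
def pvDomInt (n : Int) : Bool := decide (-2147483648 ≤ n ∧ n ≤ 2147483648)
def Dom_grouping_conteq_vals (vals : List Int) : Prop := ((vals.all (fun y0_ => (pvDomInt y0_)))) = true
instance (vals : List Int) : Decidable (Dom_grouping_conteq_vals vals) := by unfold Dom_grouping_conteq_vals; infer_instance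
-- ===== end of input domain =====

-- B labels runs of equal values by scanning maximal runs and emitting block labels
-- (objective: alternative decomposition); A and B agree on all Int lists (None cannot occur).

-- ===== PORT A =====
-- A's loop state: (group list so far, prev as Option, current group index)
def stepA (st : List Int × Option Int × Int) (curr : Int) : List Int × Option Int × Int :=
  match st with
  | (group, prev, igrp) =>
    let igrp' := match prev with
      | none => igrp
      | some p => if p ≠ curr then igrp + 1 else igrp
    (group ++ [igrp'], some curr, igrp')

def grouping_conteq_vals (vals : List Int) : List Int :=
  (vals.foldl stepA ([], none, 1)).1

-- ===== PORT B =====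
-- inner while loop of B: scan the maximal prefix of xs equal to x;
-- returns (run length of that prefix, the rest)
def scanRun (x : Int) : List Int → Nat × List Int
  | [] => (0, [])
  | y :: ys => if y = x then ((scanRun x ys).1 + 1, (scanRun x ys).2) else (0, y :: ys)

lemma scanRun_len (x : Int) : ∀ (xs : List Int), (scanRun x xs).2.length ≤ xs.length := by
  intro xs
  induction xs with
  | nil => simp [scanRun]
  | cons y ys ih =>
    by_cases h : y = x <;> simp [scanRun, h]
    omega

-- outer while loop of B: emit a block of labels per run
def goB (g : Int) (l : List Int) : List Int :=
  match l with
  | [] => []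
  | x :: xs =>
      List.replicate ((scanRun x xs).1 + 1) g ++ goB (g + 1) (scanRun x xs).2
  termination_by l.length
  decreasing_by simpa using Nat.lt_succ_of_le (scanRun_len x xs)

def grouping_conteq_vals_alt (vals : List Int) : List Int := goB 1 vals

-- ===== PRECONDITION & SPEC =====
def Spec_grouping_conteq_vals (vals : List Int) (out : List Int) : Prop := out = grouping_conteq_vals_alt vals
instance (vals : List Int) (out : List Int) : Decidable (Spec_grouping_conteq_vals vals out) := by unfold Spec_grouping_conteq_vals; infer_instance

-- ===== CLAIM (what is proved, stated in full; the proofs are below) =====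
def Claim_equal_grouping_conteq_vals : Prop := ∀ (vals : List Int), Dom_grouping_conteq_vals vals → Spec_grouping_conteq_vals vals (grouping_conteq_vals vals)

-- ===== LEMMAS AND PROOFS =====

-- the continuation of A's loop once prev = some p and group index = g
def tailB (p : Int) (g : Int) : List Int → List Int
  | [] => []
  | y :: ys => if p ≠ y then (g + 1) :: tailB y (g + 1) ys else g :: tailB p g ys

lemma foldlA_tail : ∀ (xs : List Int) (acc : List Int) (p g : Int),
    (List.foldl stepA (acc, some p, g) xs).1 = acc ++ tailB p g xs := by
  intro xs
  induction xs with
  | nil => intro acc p g; simp [tailB]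
  | cons y ys ih =>
    intro acc p g
    by_cases h : p = y
    · simp [stepA, h, tailB, ih]
    · simp [stepA, h, tailB, ih]

lemma goB_cons : ∀ (n : Nat) (xs : List Int), xs.length = n →
    ∀ (x g : Int), goB g (x :: xs) = g :: tailB x g xs := by
  intro n
  induction n using Nat.strong_induction_on with
  | _ n ih =>
    intro xs hlen x g
    match xs with
    | [] => simp [goB, scanRun, tailB]
    | y :: ys =>
      by_cases h : y = x
      · have hlt : ys.length < n := by simp at hlen; omega
        have h1 := ih ys.length hlt ys rfl y g
        have h2 := ih ys.length hlt ys rfl x g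
        have : goB g (x :: y :: ys) = g :: goB g (y :: ys) := by
          simp [goB, scanRun, h, List.replicate_succ]
        rw [this, h1, h]
        simp [tailB]
      · have hlt : ys.length < n := by simp at hlen; omega
        have h1 := ih ys.length hlt ys rfl y (g + 1)
        have : goB g (x :: y :: ys) = g :: goB (g + 1) (y :: ys) := by
          simp [goB, scanRun, h, List.replicate_succ]
        rw [this, h1]
        have h' : x ≠ y := fun e => h e.symm
        simp [tailB, h']

-- ===== VERDICT (by name: the statement is the Claim_ definition above) =====
theorem grouping_conteq_vals_spec : Claim_equal_grouping_conteq_vals := by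
  intro vals _
  unfold Spec_grouping_conteq_vals grouping_conteq_vals grouping_conteq_vals_alt
  match vals with
  | [] => simp [goB]
  | x :: xs =>
    have : List.foldl stepA ([], none, 1) (x :: xs)
        = List.foldl stepA ([1], some x, 1) xs := by simp [stepA]
    rw [this, foldlA_tail, goB_cons xs.length xs rfl x 1]
    simp
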